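-- pv_equiv track=rewrite | github.com/minsung37/Algorithm | etc/programmers/L2/L2_디펜스 게임.py | solution
-- ===== SOURCE A (Python) =====
-- import heapq
--
-- def solution(n, k, enemy):
--     heap = []
--     result = len(enemy)
--     for index, value in enumerate(enemy):
--         if n < value:
--             if k <= 0:
--                 result = index
--                 break
--             if heap:
--                 temp = -heapq.heappop(heap)
--                 if temp > value:
--                     n = n + temp - value
--                     heapq.heappush(heap, -value)
--                 else:
--                     heapq.heappush(heap, -temp)
--             k = k - 1
--         else:
--             n = n - value
--             heapq.heappush(heap, -value)
--     return result
-- ===== SOURCE B (Python) =====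
-- import heapq
--
-- def solution(n, k, enemy):
--     heap = []
--     for index, value in enumerate(enemy):
--         heapq.heappush(heap, value)
--         if len(heap) > k:
--             n -= heapq.heappop(heap)
--             if n < 0:
--                 return index
--     return len(enemy)
-- ===== Notes on version B (the rewrite author's own statement) =====
-- stated objective: simpler
-- what changed: A fights every enemy by default and, when short of soldiers, spends an ability after swapping the current enemy with the largest already-fought one popped from a negated max-heap; B is the standard one-pass solution: push every enemy on a min-heap, and once the heap holds more than k entries pop-and-fight the smallest, failing as soon as the soldier count goes negative.
-- outside the precondition, e.g. on solution(-2, 1, [3, -4, -2, 5]): A returns 3, B returns 4; on solution(2, 2, [5, 1, -9, 4, 8, 9]): A returns 5, B returns 6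
import Mathlib
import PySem

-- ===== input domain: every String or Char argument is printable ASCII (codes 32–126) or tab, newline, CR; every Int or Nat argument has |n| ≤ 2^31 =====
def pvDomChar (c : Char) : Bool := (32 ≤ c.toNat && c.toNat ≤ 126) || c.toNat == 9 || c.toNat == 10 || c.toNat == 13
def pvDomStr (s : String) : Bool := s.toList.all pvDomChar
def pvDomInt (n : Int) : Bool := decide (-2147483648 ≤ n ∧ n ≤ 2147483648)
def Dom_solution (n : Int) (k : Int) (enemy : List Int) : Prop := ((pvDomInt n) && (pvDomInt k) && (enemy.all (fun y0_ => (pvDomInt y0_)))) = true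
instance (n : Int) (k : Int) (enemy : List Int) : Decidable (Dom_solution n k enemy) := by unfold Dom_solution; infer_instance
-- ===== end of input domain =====

-- B replaces A's fight-by-default max-heap-with-swap loop by the standard keep-the-k-largest
-- min-heap scan (push every enemy, pop-and-fight the smallest once the heap exceeds k);
-- objective: simpler. Equal on nonnegative enemy lists (Pre_); proved by a loop-coupling invariant.

-- ===== PORT A =====
-- Python's heapq is used only through push and pop-min; it is represented exactly as an
-- ascending sorted list (push = ordered insert, pop = head): only the popped minimum and the
-- multiset of contents are ever observed, so this is exact.
def pvIns (x : Int) (l : List Int) : List Int := List.orderedInsert (· ≤ ·) x l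

def pvGoA : List Int → Int → Int → Int → List Int → Int → Int
  | [], _idx, _n, _k, _heap, result => result
  | v :: rest, idx, n, k, heap, result =>
    if n < v then
      if k ≤ 0 then idx
      else
        match heap with
        | [] => pvGoA rest (idx + 1) n (k - 1) heap result
        | h :: hs =>
          let temp := -h
          if temp > v then pvGoA rest (idx + 1) (n + temp - v) (k - 1) (pvIns (-v) hs) result
          else pvGoA rest (idx + 1) n (k - 1) (pvIns (-temp) hs) result
    else pvGoA rest (idx + 1) (n - v) k (pvIns (-v) heap) result

def solution (n : Int) (k : Int) (enemy : List Int) : Int :=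
  pvGoA enemy 0 n k [] (enemy.length : Int)

-- ===== PORT B =====
def pvGoB : List Int → Int → Int → Int → List Int → Int → Int
  | [], _idx, _n, _k, _heap, total => total
  | v :: rest, idx, n, k, heap, total =>
    match pvIns v heap with
    | [] => total   -- unreachable: an ordered insert is never empty
    | m :: t =>
      if ((m :: t).length : Int) > k then
        if n - m < 0 then idx else pvGoB rest (idx + 1) (n - m) k t total
      else pvGoB rest (idx + 1) n k (m :: t) total

def solution_alt (n : Int) (k : Int) (enemy : List Int) : Int :=
  pvGoB enemy 0 n k [] (enemy.length : Int)

-- ===== PRECONDITION & SPEC =====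
-- Pre_ restricts to the natural domain of the game: enemy counts are nonnegative. On lists with
-- negative entries A's fight-by-default greedy and B's keep-the-k-largest strategy are two
-- equally defensible choices of an unspecified corner and legitimately diverge.
def Pre_solution (n : Int) (k : Int) (enemy : List Int) : Prop := ∀ v ∈ enemy, 0 ≤ v
instance (n : Int) (k : Int) (enemy : List Int) : Decidable (Pre_solution n k enemy) := by
  unfold Pre_solution; infer_instance

def pvWitness_solution : Int × Int × List Int := (7, 1, [2, 3, 4])

def Spec_solution (n : Int) (k : Int) (enemy : List Int) (out : Int) : Prop := out = solution_alt n k enemy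
instance (n : Int) (k : Int) (enemy : List Int) (out : Int) : Decidable (Spec_solution n k enemy out) := by unfold Spec_solution; infer_instance

-- ===== CLAIM (what is proved, stated in full; the proofs are below) =====
def Claim_equal_solution : Prop := ∀ (n : Int) (k : Int) (enemy : List Int), Dom_solution n k enemy → Pre_solution n k enemy → Spec_solution n k enemy (solution n k enemy)

-- ===== LEMMAS AND PROOFS =====

lemma pvIns_perm (x : Int) (l : List Int) : (pvIns x l).Perm (x :: l) :=
  List.perm_orderedInsert _ x l

lemma pvIns_pairwise (x : Int) {l : List Int} (h : l.Pairwise (· ≤ ·)) :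
    (pvIns x l).Pairwise (· ≤ ·) := List.Pairwise.orderedInsert x l h

lemma pvIns_length (x : Int) (l : List Int) : (pvIns x l).length = l.length + 1 := by
  simpa using (pvIns_perm x l).length_eq

lemma pvIns_cons (x a : Int) (l : List Int) :
    pvIns x (a :: l) = if x ≤ a then x :: a :: l else a :: pvIns x l := by
  simp [pvIns, List.orderedInsert]

lemma pvIns_append_le (x e : Int) (t r : List Int) (h : x ≤ e) :
    pvIns x (t ++ e :: r) = pvIns x t ++ e :: r := by
  induction t with
  | nil => simp [pvIns, List.orderedInsert, h]
  | cons a t ih =>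
      by_cases hxa : x ≤ a
      · simp [pvIns_cons, hxa]
      · simp [pvIns_cons, hxa, ih]

lemma pvIns_append_gt (x : Int) (t r : List Int) (h : ∀ y ∈ t, y < x) :
    pvIns x (t ++ r) = t ++ pvIns x r := by
  induction t with
  | nil => simp
  | cons a t ih =>
      have hax : ¬ x ≤ a := by
        have := h a (by simp); omega
      simp only [List.cons_append, pvIns_cons, hax, if_false]
      rw [ih (fun y hy => h y (by simp [hy]))]

lemma pvIns_head_sorted (h : Int) (hs : List Int) (hsort : (h :: hs).Pairwise (· ≤ ·)) :
    pvIns h hs = h :: hs := by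
  cases hs with
  | nil => rfl
  | cons a l =>
      have : h ≤ a := (List.pairwise_cons.mp hsort).1 a (by simp)
      simp [pvIns_cons, this]

lemma pvPermIns (v : Int) {hb X : List Int} (h : hb.Perm X) : (pvIns v hb).Perm (v :: X) :=
  (pvIns_perm v hb).trans (h.cons v)

lemma pvMapNegIns (v : Int) (l : List Int) :
    ((pvIns (-v) l).map (fun x => -x)).Perm (v :: l.map (fun x => -x)) := by
  simpa using (pvIns_perm (-v) l).map (fun x : Int => -x)

lemma pvNegSum_nonneg {l : List Int} (h : ∀ x ∈ l, x ≤ 0) :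
    0 ≤ (l.map (fun x => -x)).sum := by
  induction l with
  | nil => simp
  | cons a l ih =>
      have ha := h a (by simp)
      have := ih (fun x hx => h x (by simp [hx]))
      simp only [List.map_cons, List.sum_cons]
      omega

-- head of a sorted list that is a permutation of (t₀ ++ [e]).map Neg ++ s is -e,
-- provided e bounds t₀ from above and -e bounds s from below
lemma pvHeadEq {c e : Int} {cs t₀ s : List Int}
    (hsorted : (c :: cs).Pairwise (· ≤ ·))
    (hperm : (c :: cs).Perm (((t₀ ++ [e]).map (fun x => -x)) ++ s))
    (ht₀ : ∀ y ∈ t₀, y ≤ e)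
    (hs : ∀ x ∈ s, -e ≤ x) : c = -e := by
  have hcle : ∀ x ∈ c :: cs, c ≤ x := by
    intro x hx
    rcases hx with _ | hx
    · exact le_refl _
    · exact (List.pairwise_cons.mp hsorted).1 x (by assumption)
  have hmem : (-e) ∈ c :: cs := by
    refine hperm.symm.subset ?_
    refine List.mem_append.mpr (Or.inl ?_)
    exact List.mem_map.mpr ⟨e, by simp, rfl⟩
  have h1 : c ≤ -e := hcle _ hmem
  have hcmem : c ∈ ((t₀ ++ [e]).map (fun x => -x)) ++ s := hperm.subset (by simp)
  have h2 : -e ≤ c := by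
    rcases List.mem_append.mp hcmem with hc | hc
    · rcases List.mem_map.mp hc with ⟨y, hy, rfl⟩
      rcases List.mem_append.mp hy with hy | hy
      · have := ht₀ y hy; omega
      · simp at hy; omega
    · exact hs c hc
  omega

lemma pvTakeIns_le (x e : Int) (t₀ r : List Int) (hx : x ≤ e) :
    (pvIns x (t₀ ++ e :: r)).take (t₀.length + 1) = pvIns x t₀ := by
  rw [pvIns_append_le x e t₀ r hx]
  have hl : (pvIns x t₀).length = t₀.length + 1 := pvIns_length ..
  rw [← hl, List.take_left]

lemma pvTakeIns_gt (x : Int) (t r : List Int) (h : ∀ y ∈ t, y < x) :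
    (pvIns x (t ++ r)).take t.length = t := by
  rw [pvIns_append_gt x t r h, List.take_left]

-- decomposition of a sorted list at position kt (1 ≤ kt ≤ length)
lemma pvTakeDecomp (l : List Int) (kt : Nat) (h1 : 1 ≤ kt) (h2 : kt ≤ l.length)
    (hs : l.Pairwise (· ≤ ·)) :
    ∃ t₀ e, l = t₀ ++ e :: l.drop kt ∧ l.take kt = t₀ ++ [e] ∧ t₀ = l.take (kt - 1) ∧
      t₀.length = kt - 1 ∧ (∀ y ∈ t₀, y ≤ e) ∧ e ∈ l := by
  have hlen : (l.take kt).length = kt := by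
    rw [List.length_take]; omega
  have hne : l.take kt ≠ [] := by
    intro h; rw [h] at hlen; simp at hlen; omega
  refine ⟨(l.take kt).dropLast, (l.take kt).getLast hne, ?_, ?_, ?_, ?_, ?_, ?_⟩
  · have h3 := List.dropLast_concat_getLast hne
    conv_lhs => rw [← List.take_append_drop kt l, ← h3]
    simp
  · exact (List.dropLast_concat_getLast hne).symm
  · rw [List.dropLast_eq_take, hlen, List.take_take]
    congr 1; omega
  · rw [List.length_dropLast, hlen]
  · have hsub : (l.take kt).Pairwise (· ≤ ·) := List.Pairwise.sublist (List.take_sublist kt l) hs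
    rw [← List.dropLast_concat_getLast hne] at hsub
    have := List.pairwise_append.mp hsub
    intro y hy
    exact this.2.2 y hy _ (by simp)
  · exact List.mem_of_mem_take (List.getLast_mem hne)

lemma pvIns_exists_cons (x : Int) (l : List Int) : ∃ m tl, pvIns x l = m :: tl := by
  cases l with
  | nil => exact ⟨x, [], rfl⟩
  | cons a l =>
      rw [pvIns_cons]
      by_cases h : x ≤ a
      · exact ⟨x, a :: l, by simp [h]⟩
      · exact ⟨a, pvIns x l, by simp [h]⟩

lemma pvMemIns {y x : Int} {l : List Int} : y ∈ pvIns x l ↔ y = x ∨ y ∈ l := by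
  rw [(pvIns_perm x l).mem_iff]; simp

lemma goA_fail {v n k : Int} (rest : List Int) (idx : Int) (heap : List Int) (result : Int)
    (h1 : n < v) (h2 : k ≤ 0) : pvGoA (v :: rest) idx n k heap result = idx := by
  simp [pvGoA, h1, h2]

lemma goA_fight {v n : Int} (rest : List Int) (idx k : Int) (heap : List Int) (result : Int)
    (h1 : ¬ n < v) :
    pvGoA (v :: rest) idx n k heap result = pvGoA rest (idx + 1) (n - v) k (pvIns (-v) heap) result := by
  simp [pvGoA, h1]

lemma goA_skip_nil {v n k : Int} (rest : List Int) (idx : Int) (result : Int)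
    (h1 : n < v) (h2 : ¬ k ≤ 0) :
    pvGoA (v :: rest) idx n k [] result = pvGoA rest (idx + 1) n (k - 1) [] result := by
  simp [pvGoA, h1, h2]

lemma goA_skip_swap {v n k h : Int} (rest : List Int) (idx : Int) (ta : List Int) (result : Int)
    (h1 : n < v) (h2 : ¬ k ≤ 0) (h3 : -h > v) :
    pvGoA (v :: rest) idx n k (h :: ta) result
      = pvGoA rest (idx + 1) (n + -h - v) (k - 1) (pvIns (-v) ta) result := by
  simp [pvGoA, h1, h2, h3]

lemma goA_skip_keep {v n k h : Int} (rest : List Int) (idx : Int) (ta : List Int) (result : Int)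
    (h1 : n < v) (h2 : ¬ k ≤ 0) (h3 : ¬ -h > v) :
    pvGoA (v :: rest) idx n k (h :: ta) result
      = pvGoA rest (idx + 1) n (k - 1) (pvIns h ta) result := by
  simp [pvGoA, h1, h2, h3]

lemma goB_pop_fail {v n k m : Int} (rest : List Int) (idx : Int) (heap tl : List Int) (total : Int)
    (hins : pvIns v heap = m :: tl) (hc : ((m :: tl).length : Int) > k) (hf : n - m < 0) :
    pvGoB (v :: rest) idx n k heap total = idx := by
  simp only [pvGoB, hins]
  rw [if_pos hc, if_pos hf]

lemma goB_pop_go {v n k m : Int} (rest : List Int) (idx : Int) (heap tl : List Int) (total : Int)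
    (hins : pvIns v heap = m :: tl) (hc : ((m :: tl).length : Int) > k) (hf : ¬ n - m < 0) :
    pvGoB (v :: rest) idx n k heap total = pvGoB rest (idx + 1) (n - m) k tl total := by
  simp only [pvGoB, hins]
  rw [if_pos hc, if_neg hf]

lemma goB_nopop {v n k m : Int} (rest : List Int) (idx : Int) (heap tl : List Int) (total : Int)
    (hins : pvIns v heap = m :: tl) (hc : ¬ ((m :: tl).length : Int) > k) :
    pvGoB (v :: rest) idx n k heap total = pvGoB rest (idx + 1) n k (m :: tl) total := by
  simp only [pvGoB, hins]
  rw [if_neg hc]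

-- the coupling invariant between A's state (nA, kA, ha = min-heap of negated fought values)
-- and B's state (nB, hb = min-heap of the k0 kept values), with s the values A has skipped
def pvInv (k0 nA kA : Int) (ha : List Int) (nB : Int) (hb s : List Int) : Prop :=
  ha.Pairwise (· ≤ ·) ∧ hb.Pairwise (· ≤ ·) ∧
  hb.Perm (((ha.take kA.toNat).map (fun x => -x)) ++ s) ∧
  (s.length : Int) = k0 - kA ∧ 0 ≤ kA ∧
  nB = nA + ((ha.take kA.toNat).map (fun x => -x)).sum ∧
  (∀ x ∈ ha, x ≤ 0) ∧
  (∀ x ∈ s, nA < x ∧ ∀ y ∈ ha, -y ≤ x) ∧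
  (ha ≠ [] → 0 ≤ nA)

lemma pvGoAB (k0 : Int) (es : List Int) :
    ∀ (idx nA kA : Int) (ha : List Int) (nB : Int) (hb s : List Int) (total : Int),
      (∀ v ∈ es, 0 ≤ v) → pvInv k0 nA kA ha nB hb s →
      pvGoA es idx nA kA ha total = pvGoB es idx nB k0 hb total := by
  induction es with
  | nil => intro idx nA kA ha nB hb s total _ _; simp [pvGoA, pvGoB]
  | cons v rest ih =>
    intro idx nA kA ha nB hb s total hnn hinv
    obtain ⟨hsa, hsb, hperm, hslen, hk0, hnB, hneg, hsf, hnA0⟩ := hinv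
    have hv : 0 ≤ v := hnn v (by simp)
    have hnnr : ∀ x ∈ rest, 0 ≤ x := fun x hx => hnn x (by simp [hx])
    have hktI : ((kA.toNat : Nat) : Int) = kA := Int.toNat_of_nonneg hk0
    have hblen : hb.length = (ha.take kA.toNat).length + s.length := by
      simpa using hperm.length_eq
    by_cases hnv : nA < v
    · by_cases hka : kA ≤ 0
      · -- A fails; B must fail too
        have hka0 : kA = 0 := le_antisymm hka hk0
        have htake : ha.take kA.toNat = [] := by simp [hka0]
        have hpermS : hb.Perm s := by simpa [htake] using hperm
        have hnBA : nB = nA := by simpa [htake] using hnB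
        rw [goA_fail rest idx ha total hnv hka]
        cases hb with
        | nil =>
          have hs0 : s = [] := (hpermS.symm).eq_nil
          have hk00 : k0 = 0 := by rw [hs0] at hslen; simp at hslen; omega
          have hins : pvIns v ([] : List Int) = [v] := rfl
          rw [goB_pop_fail rest idx [] [] total hins (by simp; omega) (by omega)]
        | cons c cs =>
          have hcs : c ∈ s := hpermS.subset (by simp)
          have hcA : nA < c := (hsf c hcs).1
          have hlhb : ((c :: cs).length : Int) = k0 := by
            have h9 := hpermS.length_eq; rw [h9]; omega
          by_cases hvc : v ≤ c
          · have hins : pvIns v (c :: cs) = v :: c :: cs := by simp [pvIns_cons, hvc]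
            rw [goB_pop_fail rest idx (c :: cs) (c :: cs) total hins (by simp at hlhb ⊢; omega)
              (by omega)]
          · have hins : pvIns v (c :: cs) = c :: pvIns v cs := by simp [pvIns_cons, hvc]
            rw [goB_pop_fail rest idx (c :: cs) (pvIns v cs) total hins ?_ (by omega)]
            have hl2 : (pvIns v cs).length = cs.length + 1 := pvIns_length ..
            simp [hl2] at hlhb ⊢; omega
      · -- A uses an ability
        have hka1 : 1 ≤ kA := by omega
        cases ha with
        | nil =>
          obtain ⟨m, tl, hins⟩ := pvIns_exists_cons v hb
          have hlm : (m :: tl).length = hb.length + 1 := by rw [← hins, pvIns_length]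
          have htk : (List.take kA.toNat ([] : List Int)) = [] := by simp
          rw [htk] at hblen
          have hc : ¬ ((m :: tl).length : Int) > k0 := by rw [hlm]; simp at hblen; omega
          rw [goA_skip_nil rest idx total hnv hka, goB_nopop rest idx hb tl total hins hc]
          apply ih _ _ _ _ _ _ (v :: s) _ hnnr
          have hpermS : hb.Perm s := by simpa [htk] using hperm
          refine ⟨List.Pairwise.nil, ?_, ?_, ?_, by omega, ?_, by simp, ?_, by simp⟩
          · rw [← hins]; exact pvIns_pairwise v hsb
          · rw [← hins]; simpa using pvPermIns v hpermS
          · simp; omega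
          · simpa using hnB
          · intro x hx
            rcases List.mem_cons.mp hx with rfl | hx
            · exact ⟨hnv, by simp⟩
            · exact ⟨(hsf x hx).1, by simp⟩
        | cons h ta =>
          have hnA : 0 ≤ nA := hnA0 (by simp)
          have hhead : ∀ y ∈ ta, h ≤ y := (List.pairwise_cons.mp hsa).1
          have hta : ta.Pairwise (· ≤ ·) := (List.pairwise_cons.mp hsa).2
          by_cases htv : -h > v
          · -- A swaps: the skipped value is the max fought, -h
            rw [goA_skip_swap rest idx ta total hnv hka htv]
            have hbuild : ∀ (tkN hbN : List Int) (nBN : Int),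
                (pvIns (-v) ta).take (kA - 1).toNat = tkN →
                hbN.Pairwise (· ≤ ·) →
                hbN.Perm ((tkN.map (fun x : Int => -x)) ++ (-h :: s)) →
                nBN = (nA + -h - v) + (tkN.map (fun x : Int => -x)).sum →
                pvInv k0 (nA + -h - v) (kA - 1) (pvIns (-v) ta) nBN hbN (-h :: s) := by
              intro tkN hbN nBN htkN hNsort hNperm hNsum
              refine ⟨pvIns_pairwise _ hta, hNsort, ?_, by simp; omega, by omega, ?_, ?_, ?_,
                fun _ => by omega⟩
              · rw [htkN]; exact hNperm
              · rw [htkN]; exact hNsum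
              · intro x hx
                rcases pvMemIns.mp hx with rfl | hx
                · omega
                · exact hneg x (by simp [hx])
              · intro x hx
                rcases List.mem_cons.mp hx with rfl | hx
                · refine ⟨by omega, ?_⟩
                  intro y hy
                  rcases pvMemIns.mp hy with rfl | hy
                  · omega
                  · have := hhead y hy; omega
                · obtain ⟨h1, h2⟩ := hsf x hx
                  have hxh : -h ≤ x := h2 h (by simp)
                  refine ⟨by omega, ?_⟩
                  intro y hy
                  rcases pvMemIns.mp hy with rfl | hy
                  · omega
                  · exact h2 y (by simp [hy])
            by_cases hpop : kA.toNat ≤ (h :: ta).length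
            · -- B pops
              have hkt1 : 1 ≤ kA.toNat := by omega
              obtain ⟨t₀, e, hsplit0, htake, ht₀take, ht₀len, ht₀le, heMem⟩ :=
                pvTakeDecomp (h :: ta) kA.toNat hkt1 hpop hsa
              obtain ⟨dr, hsplit⟩ : ∃ dr, h :: ta = t₀ ++ e :: dr := ⟨_, hsplit0⟩
              have htlen : ((h :: ta).take kA.toNat).length = kA.toNat := by
                rw [List.length_take]; omega
              have hblen2 : hb.length = kA.toNat + s.length := by rw [hblen, htlen]
              cases hb with
              | nil => exfalso; simp at hblen2; omega
              | cons c cs =>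
              rw [htake] at hperm hnB
              have hsE : ∀ x ∈ s, -e ≤ x := fun x hx => (hsf x hx).2 e heMem
              have hce : c = -e := pvHeadEq hsb hperm ht₀le hsE
              have hE0 : e ≤ 0 := hneg e heMem
              have ht₀neg : ∀ y ∈ t₀, y ≤ 0 := fun y hy =>
                hneg y (by rw [ht₀take] at hy; exact List.mem_of_mem_take hy)
              have hsumt₀ : 0 ≤ ((t₀.map (fun x : Int => -x)).sum) := pvNegSum_nonneg ht₀neg
              have hsum2 : nB = nA + (((t₀.map (fun x : Int => -x)).sum) + -e) := by
                rw [hnB]; simp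
              have hmid : (((t₀ ++ [e]).map (fun x : Int => -x)) ++ s).Perm
                  (-e :: ((t₀.map (fun x : Int => -x)) ++ s)) := by
                rw [List.map_append, List.append_assoc]
                simpa using
                  (List.perm_middle (a := -e) (l₁ := t₀.map (fun x : Int => -x)) (l₂ := s))
              have hcs2 : cs.Perm ((t₀.map (fun x : Int => -x)) ++ s) := by
                have h7 := hperm.trans hmid
                rw [hce] at h7
                exact h7.cons_inv
              have hcssort : cs.Pairwise (· ≤ ·) := (List.pairwise_cons.mp hsb).2
              have hlenc : ((c :: cs).length : Int) = k0 := by rw [hblen2]; push_cast; omega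
              have hkt1' : (kA - 1).toNat = kA.toNat - 1 := by omega
              cases t₀ with
              | nil =>
                have hkA1 : kA.toNat = 1 := by simp at ht₀len; omega
                obtain ⟨heh, hta2⟩ : h = e ∧ ta = dr := by simpa using hsplit
                have hvc : v ≤ c := by omega
                have hins : pvIns v (c :: cs) = v :: c :: cs := by simp [pvIns_cons, hvc]
                have hc2 : ((v :: c :: cs).length : Int) > k0 := by simp at hlenc ⊢; omega
                have hf : ¬ nB - v < 0 := by simp at hsum2; omega
                rw [goB_pop_go rest idx (c :: cs) (c :: cs) total hins hc2 hf]
                refine ih _ _ _ _ _ _ (-h :: s) _ hnnr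
                  (hbuild [] (c :: cs) (nB - v) (by rw [show (kA - 1).toNat = 0 by omega]; simp)
                    hsb ?_ ?_)
                · simp only [List.map_nil, List.nil_append]
                  rw [heh]
                  simpa using hperm
                · simp only [List.map_nil, List.sum_nil]
                  simp at hsum2; omega
              | cons g t₁' =>
                obtain ⟨rfl, hta2⟩ : h = g ∧ ta = t₁' ++ e :: dr := by simpa using hsplit
                have ht₁len : t₁'.length + 1 = kA.toNat - 1 := by simpa using ht₀len
                have ht₁le : ∀ y ∈ t₁', y ≤ e := fun y hy => ht₀le y (by simp [hy])
                have hsumt₁ : 0 ≤ (t₁'.map (fun x : Int => -x)).sum :=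
                  pvNegSum_nonneg (fun y hy => ht₀neg y (by simp [hy]))
                simp only [List.map_cons, List.sum_cons] at hsum2
                by_cases hvc : v ≤ c
                · have hins : pvIns v (c :: cs) = v :: c :: cs := by simp [pvIns_cons, hvc]
                  have hc2 : ((v :: c :: cs).length : Int) > k0 := by simp at hlenc ⊢; omega
                  have hf : ¬ nB - v < 0 := by omega
                  rw [goB_pop_go rest idx (c :: cs) (c :: cs) total hins hc2 hf]
                  by_cases hve : -v ≤ e
                  · have hvv : v = -e := by omega
                    have htkeq : (pvIns (-v) ta).take (kA - 1).toNat = pvIns (-v) t₁' := by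
                      rw [hta2, show (kA - 1).toNat = t₁'.length + 1 by omega]
                      exact pvTakeIns_le (-v) e t₁' dr hve
                    refine ih _ _ _ _ _ _ (-h :: s) _ hnnr
                      (hbuild (pvIns (-v) t₁') (c :: cs) (nB - v) htkeq hsb ?_ ?_)
                    · refine (hperm.trans hmid).trans ?_
                      rw [← hvv]
                      simp only [List.map_cons, List.cons_append]
                      refine List.Perm.trans ?_
                        (((pvMapNegIns v t₁').symm).append_right (-h :: s))
                      exact List.Perm.cons v List.perm_middle.symm
                    · have hs9 := (pvMapNegIns v t₁').sum_eq
                      rw [List.sum_cons] at hs9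
                      rw [hs9]; omega
                  · have htkeq : (pvIns (-v) ta).take (kA - 1).toNat = t₁' ++ [e] := by
                      rw [hta2, show t₁' ++ e :: dr = (t₁' ++ [e]) ++ dr by simp]
                      have hlt2 : ∀ y ∈ t₁' ++ [e], y < -v := by
                        intro y hy
                        rcases List.mem_append.mp hy with hy | hy
                        · have := ht₁le y hy; omega
                        · simp at hy; omega
                      have h10 := pvTakeIns_gt (-v) (t₁' ++ [e]) dr hlt2
                      have h11 : (t₁' ++ [e]).length = (kA - 1).toNat := by simp; omega
                      rw [h11] at h10; exact h10
                    refine ih _ _ _ _ _ _ (-h :: s) _ hnnr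
                      (hbuild (t₁' ++ [e]) (c :: cs) (nB - v) htkeq hsb ?_ ?_)
                    · refine hperm.trans ?_
                      simp only [List.cons_append, List.map_cons]
                      exact List.perm_middle.symm
                    · simp only [List.map_append, List.sum_append, List.map_cons,
                        List.sum_cons, List.map_nil, List.sum_nil]
                      omega
                · have hins : pvIns v (c :: cs) = c :: pvIns v cs := by simp [pvIns_cons, hvc]
                  have hlpv : (pvIns v cs).length = cs.length + 1 := pvIns_length ..
                  have hc2 : ((c :: pvIns v cs).length : Int) > k0 := by
                    simp [hlpv] at hlenc ⊢; omega
                  have hf : ¬ nB - c < 0 := by omega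
                  rw [goB_pop_go rest idx (c :: cs) (pvIns v cs) total hins hc2 hf]
                  have htkeq : (pvIns (-v) ta).take (kA - 1).toNat = pvIns (-v) t₁' := by
                    rw [hta2, show (kA - 1).toNat = t₁'.length + 1 by omega]
                    exact pvTakeIns_le (-v) e t₁' dr (by omega)
                  refine ih _ _ _ _ _ _ (-h :: s) _ hnnr
                    (hbuild (pvIns (-v) t₁') (pvIns v cs) (nB - c) htkeq
                      (pvIns_pairwise v hcssort) ?_ ?_)
                  · refine (pvPermIns v hcs2).trans ?_
                    simp only [List.map_cons, List.cons_append]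
                    refine List.Perm.trans ?_
                      (((pvMapNegIns v t₁').symm).append_right (-h :: s))
                    exact List.Perm.cons v List.perm_middle.symm
                  · have hs9 := (pvMapNegIns v t₁').sum_eq
                    rw [List.sum_cons] at hs9
                    rw [hs9]; omega
            · -- B does not pop
              simp only [List.length_cons] at hpop
              have htk : (h :: ta).take kA.toNat = h :: ta :=
                List.take_of_length_le (by simp; omega)
              rw [htk] at hperm hnB hblen
              simp only [List.length_cons] at hblen
              obtain ⟨m, tl, hins⟩ := pvIns_exists_cons v hb
              have hlm : (m :: tl).length = hb.length + 1 := by rw [← hins, pvIns_length]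
              have hc2 : ¬ ((m :: tl).length : Int) > k0 := by rw [hlm]; omega
              rw [goB_nopop rest idx hb tl total hins hc2]
              have htkeq : (pvIns (-v) ta).take (kA - 1).toNat = pvIns (-v) ta :=
                List.take_of_length_le (by rw [pvIns_length]; omega)
              refine ih _ _ _ _ _ _ (-h :: s) _ hnnr
                (hbuild (pvIns (-v) ta) (m :: tl) nB htkeq (hins ▸ pvIns_pairwise v hsb) ?_ ?_)
              · rw [← hins]
                refine (pvPermIns v hperm).trans ?_
                simp only [List.map_cons, List.cons_append]
                refine List.Perm.trans ?_ (((pvMapNegIns v ta).symm).append_right (-h :: s))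
                exact List.Perm.cons v List.perm_middle.symm
              · have hs9 := (pvMapNegIns v ta).sum_eq
                rw [List.sum_cons] at hs9
                rw [hs9]
                simp only [List.map_cons, List.sum_cons] at hnB
                omega
          · -- A keeps its heap: the skipped value is v itself
            rw [goA_skip_keep rest idx ta total hnv hka htv, pvIns_head_sorted h ta hsa]
            have hbuildK : ∀ (tkN hbN : List Int) (nBN : Int),
                (h :: ta).take (kA - 1).toNat = tkN →
                hbN.Pairwise (· ≤ ·) →
                hbN.Perm ((tkN.map (fun x : Int => -x)) ++ (v :: s)) →
                nBN = nA + (tkN.map (fun x : Int => -x)).sum →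
                pvInv k0 nA (kA - 1) (h :: ta) nBN hbN (v :: s) := by
              intro tkN hbN nBN htkN hNsort hNperm hNsum
              refine ⟨hsa, hNsort, ?_, by simp; omega, by omega, ?_, hneg, ?_, fun _ => hnA⟩
              · rw [htkN]; exact hNperm
              · rw [htkN]; exact hNsum
              · intro x hx
                rcases List.mem_cons.mp hx with rfl | hx
                · refine ⟨hnv, ?_⟩
                  intro y hy
                  rcases List.mem_cons.mp hy with rfl | hy
                  · omega
                  · have := hhead y hy; omega
                · exact hsf x hx
            by_cases hpop : kA.toNat ≤ (h :: ta).length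
            · -- B pops
              have hkt1 : 1 ≤ kA.toNat := by omega
              obtain ⟨t₀, e, hsplit0, htake, ht₀take, ht₀len, ht₀le, heMem⟩ :=
                pvTakeDecomp (h :: ta) kA.toNat hkt1 hpop hsa
              have htlen : ((h :: ta).take kA.toNat).length = kA.toNat := by
                rw [List.length_take]; omega
              have hblen2 : hb.length = kA.toNat + s.length := by rw [hblen, htlen]
              cases hb with
              | nil => exfalso; simp at hblen2; omega
              | cons c cs =>
              rw [htake] at hperm hnB
              have hsE : ∀ x ∈ s, -e ≤ x := fun x hx => (hsf x hx).2 e heMem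
              have hce : c = -e := pvHeadEq hsb hperm ht₀le hsE
              have hEh : h ≤ e := by
                rcases List.mem_cons.mp heMem with heq | hy
                · omega
                · exact hhead e hy
              have ht₀neg : ∀ y ∈ t₀, y ≤ 0 := fun y hy =>
                hneg y (by rw [ht₀take] at hy; exact List.mem_of_mem_take hy)
              have hsumt₀ : 0 ≤ ((t₀.map (fun x : Int => -x)).sum) := pvNegSum_nonneg ht₀neg
              have hsum2 : nB = nA + (((t₀.map (fun x : Int => -x)).sum) + -e) := by
                rw [hnB]; simp
              have hmid : (((t₀ ++ [e]).map (fun x : Int => -x)) ++ s).Perm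
                  (-e :: ((t₀.map (fun x : Int => -x)) ++ s)) := by
                rw [List.map_append, List.append_assoc]
                simpa using
                  (List.perm_middle (a := -e) (l₁ := t₀.map (fun x : Int => -x)) (l₂ := s))
              have hcs2 : cs.Perm ((t₀.map (fun x : Int => -x)) ++ s) := by
                have h7 := hperm.trans hmid
                rw [hce] at h7
                exact h7.cons_inv
              have hcssort : cs.Pairwise (· ≤ ·) := (List.pairwise_cons.mp hsb).2
              have hlenc : ((c :: cs).length : Int) = k0 := by rw [hblen2]; push_cast; omega
              have hkt1' : (kA - 1).toNat = kA.toNat - 1 := by omega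
              have htkeq : (h :: ta).take (kA - 1).toNat = t₀ := by
                rw [hkt1']; exact ht₀take.symm
              by_cases hvc : v ≤ c
              · have hvv : v = -e := by omega
                have hins : pvIns v (c :: cs) = v :: c :: cs := by simp [pvIns_cons, hvc]
                have hc2 : ((v :: c :: cs).length : Int) > k0 := by simp at hlenc ⊢; omega
                have hf : ¬ nB - v < 0 := by omega
                rw [goB_pop_go rest idx (c :: cs) (c :: cs) total hins hc2 hf]
                refine ih _ _ _ _ _ _ (v :: s) _ hnnr
                  (hbuildK t₀ (c :: cs) (nB - v) htkeq hsb ?_ ?_)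
                · refine (hperm.trans hmid).trans ?_
                  rw [← hvv]
                  exact List.perm_middle.symm
                · omega
              · have hins : pvIns v (c :: cs) = c :: pvIns v cs := by simp [pvIns_cons, hvc]
                have hlpv : (pvIns v cs).length = cs.length + 1 := pvIns_length ..
                have hc2 : ((c :: pvIns v cs).length : Int) > k0 := by
                  simp [hlpv] at hlenc ⊢; omega
                have hf : ¬ nB - c < 0 := by omega
                rw [goB_pop_go rest idx (c :: cs) (pvIns v cs) total hins hc2 hf]
                refine ih _ _ _ _ _ _ (v :: s) _ hnnr
                  (hbuildK t₀ (pvIns v cs) (nB - c) htkeq (pvIns_pairwise v hcssort) ?_ ?_)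
                · refine (pvPermIns v hcs2).trans ?_
                  exact List.perm_middle.symm
                · omega
            · -- B does not pop
              simp only [List.length_cons] at hpop
              have htk : (h :: ta).take kA.toNat = h :: ta :=
                List.take_of_length_le (by simp; omega)
              rw [htk] at hperm hnB hblen
              simp only [List.length_cons] at hblen
              obtain ⟨m, tl, hins⟩ := pvIns_exists_cons v hb
              have hlm : (m :: tl).length = hb.length + 1 := by rw [← hins, pvIns_length]
              have hc2 : ¬ ((m :: tl).length : Int) > k0 := by rw [hlm]; omega
              rw [goB_nopop rest idx hb tl total hins hc2]
              have htkeq : (h :: ta).take (kA - 1).toNat = h :: ta :=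
                List.take_of_length_le (by simp; omega)
              refine ih _ _ _ _ _ _ (v :: s) _ hnnr
                (hbuildK (h :: ta) (m :: tl) nB htkeq (hins ▸ pvIns_pairwise v hsb) ?_ ?_)
              · rw [← hins]
                refine (pvPermIns v hperm).trans ?_
                exact List.perm_middle.symm
              · exact hnB
    · -- A fights v
      have hnvge : v ≤ nA := by omega
      rw [goA_fight rest idx kA ha total hnv]
      have hbuildF : ∀ (tkN hbN : List Int) (nBN : Int),
          (pvIns (-v) ha).take kA.toNat = tkN →
          hbN.Pairwise (· ≤ ·) →
          hbN.Perm ((tkN.map (fun x : Int => -x)) ++ s) →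
          nBN = (nA - v) + (tkN.map (fun x : Int => -x)).sum →
          pvInv k0 (nA - v) kA (pvIns (-v) ha) nBN hbN s := by
        intro tkN hbN nBN htkN hNsort hNperm hNsum
        refine ⟨pvIns_pairwise _ hsa, hNsort, ?_, hslen, hk0, ?_, ?_, ?_, fun _ => by omega⟩
        · rw [htkN]; exact hNperm
        · rw [htkN]; exact hNsum
        · intro x hx
          rcases pvMemIns.mp hx with rfl | hx
          · omega
          · exact hneg x hx
        · intro x hx
          obtain ⟨h1, h2⟩ := hsf x hx
          refine ⟨by omega, ?_⟩
          intro y hy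
          rcases pvMemIns.mp hy with rfl | hy
          · omega
          · exact h2 y hy
      by_cases hpop : kA.toNat ≤ ha.length
      · by_cases hkt0 : kA.toNat = 0
        · -- no abilities were kept back: B's heap content is exactly s
          have htake0 : ha.take kA.toNat = [] := by simp [hkt0]
          rw [htake0] at hperm hnB
          simp only [List.map_nil, List.nil_append] at hperm
          simp only [List.map_nil, List.sum_nil, add_zero] at hnB
          cases hb with
          | nil =>
            have hs0 : s = [] := (hperm.symm).eq_nil
            have hk00 : k0 = 0 := by rw [hs0] at hslen; simp at hslen; omega
            have hins : pvIns v ([] : List Int) = [v] := rfl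
            have hc2 : (((v :: ([] : List Int))).length : Int) > k0 := by simp; omega
            have hf : ¬ nB - v < 0 := by omega
            rw [goB_pop_go rest idx [] [] total hins hc2 hf]
            refine ih _ _ _ _ _ _ s _ hnnr
              (hbuildF [] [] (nB - v) (by simp [hkt0]) List.Pairwise.nil ?_ ?_)
            · simp [hs0]
            · simp; omega
          | cons c cs =>
            have hcmem : c ∈ s := hperm.subset (by simp)
            have hvc : v ≤ c := by have := (hsf c hcmem).1; omega
            have hins : pvIns v (c :: cs) = v :: c :: cs := by simp [pvIns_cons, hvc]
            have hlen0 : (c :: cs).length = s.length := hperm.length_eq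
            have hc2 : ((v :: c :: cs).length : Int) > k0 := by
              simp at hlen0 ⊢; omega
            have hf : ¬ nB - v < 0 := by omega
            rw [goB_pop_go rest idx (c :: cs) (c :: cs) total hins hc2 hf]
            refine ih _ _ _ _ _ _ s _ hnnr
              (hbuildF [] (c :: cs) (nB - v) (by simp [hkt0]) hsb (by simpa using hperm)
                (by simp; omega))
        · -- kA.toNat ≥ 1
          have hkt1 : 1 ≤ kA.toNat := by omega
          obtain ⟨t₀, e, hsplit0, htake, ht₀take, ht₀len, ht₀le, heMem⟩ :=
            pvTakeDecomp ha kA.toNat hkt1 hpop hsa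
          obtain ⟨dr, hsplit⟩ : ∃ dr, ha = t₀ ++ e :: dr := ⟨_, hsplit0⟩
          have htlen : (ha.take kA.toNat).length = kA.toNat := by
            rw [List.length_take]; omega
          have hblen2 : hb.length = kA.toNat + s.length := by rw [hblen, htlen]
          cases hb with
          | nil => exfalso; simp at hblen2; omega
          | cons c cs =>
          rw [htake] at hperm hnB
          have hsE : ∀ x ∈ s, -e ≤ x := fun x hx => (hsf x hx).2 e heMem
          have hce : c = -e := pvHeadEq hsb hperm ht₀le hsE
          have hE0 : e ≤ 0 := hneg e heMem
          have ht₀neg : ∀ y ∈ t₀, y ≤ 0 := fun y hy =>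
            hneg y (by rw [ht₀take] at hy; exact List.mem_of_mem_take hy)
          have hsumt₀ : 0 ≤ ((t₀.map (fun x : Int => -x)).sum) := pvNegSum_nonneg ht₀neg
          have hsum2 : nB = nA + (((t₀.map (fun x : Int => -x)).sum) + -e) := by
            rw [hnB]; simp
          have hmid : (((t₀ ++ [e]).map (fun x : Int => -x)) ++ s).Perm
              (-e :: ((t₀.map (fun x : Int => -x)) ++ s)) := by
            rw [List.map_append, List.append_assoc]
            simpa using
              (List.perm_middle (a := -e) (l₁ := t₀.map (fun x : Int => -x)) (l₂ := s))
          have hcs2 : cs.Perm ((t₀.map (fun x : Int => -x)) ++ s) := by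
            have h7 := hperm.trans hmid
            rw [hce] at h7
            exact h7.cons_inv
          have hcssort : cs.Pairwise (· ≤ ·) := (List.pairwise_cons.mp hsb).2
          have hlenc : ((c :: cs).length : Int) = k0 := by rw [hblen2]; push_cast; omega
          have hkt₀1 : t₀.length + 1 = kA.toNat := by omega
          by_cases hvc : v ≤ c
          · have hins : pvIns v (c :: cs) = v :: c :: cs := by simp [pvIns_cons, hvc]
            have hc2 : ((v :: c :: cs).length : Int) > k0 := by simp at hlenc ⊢; omega
            have hf : ¬ nB - v < 0 := by omega
            rw [goB_pop_go rest idx (c :: cs) (c :: cs) total hins hc2 hf]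
            by_cases hve : -v ≤ e
            · have hvv : v = -e := by omega
              have htkeq : (pvIns (-v) ha).take kA.toNat = pvIns (-v) t₀ := by
                rw [hsplit, ← hkt₀1]
                exact pvTakeIns_le (-v) e t₀ dr hve
              refine ih _ _ _ _ _ _ s _ hnnr
                (hbuildF (pvIns (-v) t₀) (c :: cs) (nB - v) htkeq hsb ?_ ?_)
              · refine (hperm.trans hmid).trans ?_
                rw [← hvv]
                exact ((pvMapNegIns v t₀).symm).append_right s
              · have hs9 := (pvMapNegIns v t₀).sum_eq
                rw [List.sum_cons] at hs9
                rw [hs9]; omega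
            · have htkeq : (pvIns (-v) ha).take kA.toNat = t₀ ++ [e] := by
                rw [hsplit, show t₀ ++ e :: dr = (t₀ ++ [e]) ++ dr by simp]
                have hlt2 : ∀ y ∈ t₀ ++ [e], y < -v := by
                  intro y hy
                  rcases List.mem_append.mp hy with hy | hy
                  · have := ht₀le y hy; omega
                  · simp at hy; omega
                have h10 := pvTakeIns_gt (-v) (t₀ ++ [e]) dr hlt2
                have h11 : (t₀ ++ [e]).length = kA.toNat := by simp; omega
                rw [h11] at h10; exact h10
              refine ih _ _ _ _ _ _ s _ hnnr
                (hbuildF (t₀ ++ [e]) (c :: cs) (nB - v) htkeq hsb hperm ?_)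
              · simp only [List.map_append, List.sum_append, List.map_cons,
                  List.sum_cons, List.map_nil, List.sum_nil]
                omega
          · have hins : pvIns v (c :: cs) = c :: pvIns v cs := by simp [pvIns_cons, hvc]
            have hlpv : (pvIns v cs).length = cs.length + 1 := pvIns_length ..
            have hc2 : ((c :: pvIns v cs).length : Int) > k0 := by
              simp [hlpv] at hlenc ⊢; omega
            have hf : ¬ nB - c < 0 := by omega
            rw [goB_pop_go rest idx (c :: cs) (pvIns v cs) total hins hc2 hf]
            have htkeq : (pvIns (-v) ha).take kA.toNat = pvIns (-v) t₀ := by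
              rw [hsplit, ← hkt₀1]
              exact pvTakeIns_le (-v) e t₀ dr (by omega)
            refine ih _ _ _ _ _ _ s _ hnnr
              (hbuildF (pvIns (-v) t₀) (pvIns v cs) (nB - c) htkeq
                (pvIns_pairwise v hcssort) ?_ ?_)
            · refine (pvPermIns v hcs2).trans ?_
              exact ((pvMapNegIns v t₀).symm).append_right s
            · have hs9 := (pvMapNegIns v t₀).sum_eq
              rw [List.sum_cons] at hs9
              rw [hs9]; omega
      · -- B does not pop
        have hlt : ha.length < kA.toNat := by omega
        have htk : ha.take kA.toNat = ha := List.take_of_length_le (by omega)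
        rw [htk] at hperm hnB hblen
        obtain ⟨m, tl, hins⟩ := pvIns_exists_cons v hb
        have hlm : (m :: tl).length = hb.length + 1 := by rw [← hins, pvIns_length]
        have hc2 : ¬ ((m :: tl).length : Int) > k0 := by rw [hlm]; omega
        rw [goB_nopop rest idx hb tl total hins hc2]
        have htkeq : (pvIns (-v) ha).take kA.toNat = pvIns (-v) ha :=
          List.take_of_length_le (by rw [pvIns_length]; omega)
        refine ih _ _ _ _ _ _ s _ hnnr
          (hbuildF (pvIns (-v) ha) (m :: tl) nB htkeq (hins ▸ pvIns_pairwise v hsb) ?_ ?_)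
        · rw [← hins]
          refine (pvPermIns v hperm).trans ?_
          exact ((pvMapNegIns v ha).symm).append_right s
        · have hs9 := (pvMapNegIns v ha).sum_eq
          rw [List.sum_cons] at hs9
          rw [hs9]; omega

lemma pvGoAB_neg (k0 : Int) (hk : k0 < 0) (es : List Int) :
    ∀ (idx n : Int) (ha : List Int) (total : Int),
      pvGoA es idx n k0 ha total = pvGoB es idx n k0 [] total := by
  induction es with
  | nil => intro idx n ha total; simp [pvGoA, pvGoB]
  | cons v rest ih =>
      intro idx n ha total
      have hk' : k0 ≤ 0 := le_of_lt hk
      have hlen : ((1 : Nat) : Int) > k0 := by omega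
      by_cases hnv : n < v
      · simp [pvGoA, pvGoB, pvIns, List.orderedInsert, hnv, hk', hlen]
        omega
      · have : ¬ (n - v < 0) := by omega
        simp [pvGoA, pvGoB, pvIns, List.orderedInsert, hnv, hk', hlen, this, ih]
        exact fun h => absurd h (by omega)

-- ===== VERDICT (by name: the statement is the Claim_ definition above) =====
theorem solution_spec : Claim_equal_solution := by
  intro n k enemy _hdom hpre
  show solution n k enemy = solution_alt n k enemy
  by_cases hk : 0 ≤ k
  · exact pvGoAB k enemy 0 n k [] n [] [] _ hpre
      (by refine ⟨List.Pairwise.nil, List.Pairwise.nil, by simp, by simp, hk, by simp, by simp, by simp, by simp⟩)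
  · exact pvGoAB_neg k (by omega) enemy 0 n [] _
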